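-- pv_equiv track=rewrite | github.com/mdsiaofficial/ProblemSolving | SRBD Code Contest/A.py | max_participants
-- ===== SOURCE A (Python) =====
-- import math
--
-- def max_participants(t, test_cases):
--     results = []
--
--     for i in range(t):
--         B, y = test_cases[i]
--         m = int(math.log2(B))
--
--         # Calculate the maximum number of problems that can be prepared
--         max_problems = B // y
--
--         # Distribute problems equally between the two rounds
--         problems_round1 = m // 2
--         problems_round2 = m - problems_round1
--
--         # Calculate the cost of preparing problems and hosting the rounds
--         cost = (problems_round1 + problems_round2) * y + problems_round1**2 + problems_round2**2
--
--         # Check if the cost exceeds the budget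
--         while cost > B:
--             m -= 1
--             problems_round1 = m // 2
--             problems_round2 = m - problems_round1
--             cost = (problems_round1 + problems_round2) * y + problems_round1**2 + problems_round2**2
--
--         # Calculate the maximum number of participants
--         max_participants = 2 ** m
--
--         results.append(max_participants)
--
--     return results
-- ===== SOURCE B (Python) =====
-- import math
--
-- def max_participants(t, test_cases):
--     results = []
--     for i in range(t):
--         B, y = test_cases[i]
--         # largest m with m*y + (m//2)**2 + (m - m//2)**2 <= B is isqrt(2B + y^2) - y;
--         # cap at floor(log2(B)) = bit_length - 1, A's starting point.
--         m0 = B.bit_length() - 1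
--         m = min(m0, math.isqrt(2 * B + y * y) - y)
--         results.append(2 ** m)
--     return results
-- ===== Notes on version B (the rewrite author's own statement) =====
-- stated objective: simpler
-- what changed: The per-test-case decrement-until-affordable while loop is replaced by a closed-form answer min(bit_length(B)-1, isqrt(2*B + y*y) - y), derived from 2*cost(m) = (m+y)^2 - y^2 + m%2.
import Mathlib
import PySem

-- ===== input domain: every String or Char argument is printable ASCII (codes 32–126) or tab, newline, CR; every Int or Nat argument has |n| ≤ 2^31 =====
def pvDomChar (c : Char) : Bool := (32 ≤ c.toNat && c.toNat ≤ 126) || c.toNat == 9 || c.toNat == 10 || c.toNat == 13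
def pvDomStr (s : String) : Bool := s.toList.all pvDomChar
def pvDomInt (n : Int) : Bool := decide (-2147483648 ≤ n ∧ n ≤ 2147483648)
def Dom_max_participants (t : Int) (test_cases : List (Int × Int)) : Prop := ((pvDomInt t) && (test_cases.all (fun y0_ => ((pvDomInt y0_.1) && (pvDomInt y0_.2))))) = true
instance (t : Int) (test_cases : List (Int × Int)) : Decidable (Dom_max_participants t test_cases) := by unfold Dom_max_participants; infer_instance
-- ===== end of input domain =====

-- B replaces A's decrement-until-affordable while loop with a closed-form integer-sqrt answer per test case (objective: simpler).


-- ===== PORT A =====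
-- cost = (problems_round1 + problems_round2) * y + problems_round1**2 + problems_round2**2 (A computes this expression verbatim, twice)
def pvCost (y m : Int) : Int :=
  let problems_round1 := PySem.Int.floordiv m 2
  let problems_round2 := m - problems_round1
  (problems_round1 + problems_round2) * y + problems_round1 ^ 2 + problems_round2 ^ 2

-- the 'while cost > B: m -= 1; …' loop; fuel m₀.toNat + 1 suffices inside Pre_ (the loop stops at m = 0 at the latest, since cost 0 = 0 ≤ B)
def pvLoopA (B y : Int) : Nat → Int → Int
  | 0, m => m
  | Nat.succ fuel, m => if pvCost y m > B then pvLoopA B y fuel (m - 1) else m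

def max_participants (t : Int) (test_cases : List (Int × Int)) : List Int :=
  (PySem.List.pyRange 0 t 1).foldl (fun results i =>
    match PySem.List.pyGet? test_cases i with
    | none => results            -- IndexError: excluded by Pre_
    | some (B, y) =>
      -- m = int(math.log2(B)) = B.bit_length() - 1: exact for 1 ≤ B ≤ 2^31 (B ≤ 0 raises ValueError: excluded by Pre_)
      let m : Int := (PySem.Int.bitLength B : Int) - 1
      -- max_problems = B // y (unused; y = 0 raises ZeroDivisionError: excluded by Pre_)
      let _max_problems := PySem.Int.floordiv B y
      let m' := pvLoopA B y (m.toNat + 1) m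
      -- 2 ** m: m' ≥ 0 inside Pre_
      results ++ [2 ^ m'.toNat]) []

-- ===== PORT B =====
-- math.isqrt(n) = ⌊√n⌋, exact for n ≥ 0 (count up while the next square still fits; kernel-reducible)
def pvIsqrtGo (n : Nat) : Nat → Nat → Nat
  | 0, k => k
  | Nat.succ fuel, k => if (k + 1) * (k + 1) ≤ n then pvIsqrtGo n fuel (k + 1) else k

def pvIsqrt (n : Nat) : Nat := pvIsqrtGo n n 0

def max_participants_alt (t : Int) (test_cases : List (Int × Int)) : List Int :=
  (PySem.List.pyRange 0 t 1).foldl (fun results i =>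
    match PySem.List.pyGet? test_cases i with
    | none => results            -- IndexError: excluded by Pre_
    | some (B, y) =>
      -- m0 = B.bit_length() - 1
      let m0 : Int := (PySem.Int.bitLength B : Int) - 1
      -- m = min(m0, math.isqrt(2*B + y*y) - y)   (the argument of isqrt is ≥ 0 inside Pre_)
      let m := min m0 ((pvIsqrt (2 * B + y * y).toNat : Int) - y)
      results ++ [2 ^ m.toNat]) []

-- ===== PRECONDITION & SPEC =====
-- Pre_ = exactly where A returns: the list holds at least t entries (test_cases[i] raises IndexError otherwise)
-- and the first t entries have budget B ≥ 1 (math.log2 raises on B ≤ 0) and y ≠ 0 (B // y raises).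
def Pre_max_participants (t : Int) (test_cases : List (Int × Int)) : Prop :=
  t.toNat ≤ test_cases.length ∧ ∀ p ∈ test_cases.take t.toNat, 1 ≤ p.1 ∧ p.2 ≠ 0
instance (t : Int) (test_cases : List (Int × Int)) : Decidable (Pre_max_participants t test_cases) := by unfold Pre_max_participants; infer_instance
def pvWitness_max_participants : Int × (List (Int × Int)) := (2, [(8, 3), (100, 1)])

def Spec_max_participants (t : Int) (test_cases : List (Int × Int)) (out : List Int) : Prop := out = max_participants_alt t test_cases
instance (t : Int) (test_cases : List (Int × Int)) (out : List Int) : Decidable (Spec_max_participants t test_cases out) := by unfold Spec_max_participants; infer_instance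

-- ===== CLAIM (what is proved, stated in full; the proofs are below) =====
def Claim_equal_max_participants : Prop := ∀ (t : Int) (test_cases : List (Int × Int)), Dom_max_participants t test_cases → Pre_max_participants t test_cases → Spec_max_participants t test_cases (max_participants t test_cases)
-- ===== LEMMAS AND PROOFS =====

-- 2 * cost m = 2·m·y + m² + (m % 2)², with m % 2 ∈ {0, 1}
lemma pvCost_eq (y m : Int) :
    2 * pvCost y m = 2 * m * y + m ^ 2 + (PySem.Int.mod m 2) ^ 2 := by
  have h := PySem.Int.floordiv_mul_add_mod m 2
  simp only [pvCost]
  linear_combination (2 * PySem.Int.floordiv m 2 - m - PySem.Int.mod m 2) * h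

-- pvIsqrtGo invariant: landing value r has r² ≤ n < (r+1)²
lemma pvIsqrtGo_spec (n : Nat) : ∀ fuel k, k * k ≤ n → n < (k + fuel + 1) * (k + fuel + 1) →
    pvIsqrtGo n fuel k * pvIsqrtGo n fuel k ≤ n ∧ n < (pvIsqrtGo n fuel k + 1) * (pvIsqrtGo n fuel k + 1) := by
  intro fuel
  induction fuel with
  | zero => intro k h1 h2; simpa [pvIsqrtGo] using ⟨h1, by simpa using h2⟩
  | succ f ih =>
    intro k h1 h2
    by_cases hc : (k + 1) * (k + 1) ≤ n
    · have he : n < (k + 1 + f + 1) * (k + 1 + f + 1) := by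
        have heq : k + 1 + f + 1 = k + (f + 1) + 1 := by omega
        rw [heq]; exact h2
      simpa [pvIsqrtGo, hc] using ih (k + 1) hc he
    · simpa [pvIsqrtGo, hc] using ⟨h1, by omega⟩

lemma pvIsqrt_spec (n : Nat) : pvIsqrt n * pvIsqrt n ≤ n ∧ n < (pvIsqrt n + 1) * (pvIsqrt n + 1) := by
  have h : n < (n + 1) * (n + 1) := by
    calc n < n + 1 := Nat.lt_succ_self n
    _ ≤ (n + 1) * (n + 1) := Nat.le_mul_of_pos_left _ (by omega)
  exact pvIsqrtGo_spec n n 0 (by omega) (by simpa using h)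

-- n² + 1 ≤ 2^(n+1)
lemma pv_sq_add_one_le_two_pow : ∀ n : Nat, n ^ 2 + 1 ≤ 2 ^ (n + 1) := by
  intro n
  induction n with
  | zero => decide
  | succ k ih =>
    have h1 : k < 2 ^ k := Nat.lt_two_pow_self
    simp only [pow_succ] at *
    nlinarith

-- the decrement loop lands on tgt once cost tgt ≤ B and cost > B strictly above tgt (up to the start)
lemma pvLoop_char (B y tgt : Int) (hc : ¬ pvCost y tgt > B) :
    ∀ fuel m, tgt ≤ m → (m - tgt).toNat < fuel →
      (∀ k, tgt < k → k ≤ m → pvCost y k > B) → pvLoopA B y fuel m = tgt := by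
  intro fuel
  induction fuel with
  | zero => intro m _ h _; omega
  | succ f ih =>
    intro m hm hf habove
    rcases eq_or_lt_of_le hm with rfl | hlt
    · simp [pvLoopA, hc]
    · have hcm : pvCost y m > B := habove m hlt le_rfl
      simp only [pvLoopA, hcm, if_pos]
      exact ih (m - 1) (by omega) (by omega) (fun k hk1 hk2 => habove k hk1 (by omega))

-- key per-test-case lemma: the decrement loop from m₀ lands exactly on min m₀ (isqrt(2B+y²) − y)
lemma pvKey (B y : Int) (hB : 1 ≤ B) :
    pvLoopA B y ((((PySem.Int.bitLength B : Int) - 1).toNat) + 1) ((PySem.Int.bitLength B : Int) - 1)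
      = min ((PySem.Int.bitLength B : Int) - 1) ((pvIsqrt (2 * B + y * y).toNat : Int) - y) := by
  set m0 : Int := (PySem.Int.bitLength B : Int) - 1 with hm0def
  set s : Int := 2 * B + y * y with hsdef
  set r : Int := (pvIsqrt s.toNat : Int) with hrdef
  have hyy : 0 ≤ y * y := mul_self_nonneg y
  have hsnn : 0 ≤ s := by omega
  have hstn : (s.toNat : Int) = s := Int.toNat_of_nonneg hsnn
  -- bitLength facts
  have hbl1 : 1 ≤ PySem.Int.bitLength B := by
    by_contra h
    have h0 : PySem.Int.bitLength B = 0 := by omega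
    have hlt := PySem.Int.lt_two_pow_bitLength B
    rw [h0] at hlt
    simp at hlt
    omega
  have hm0nn : 0 ≤ m0 := by omega
  have hBlow : (2 : Int) ^ m0.toNat ≤ B := by
    have h := PySem.Int.two_pow_bitLength_le B (by omega)
    have hna : (B.natAbs : Int) = B := Int.natAbs_of_nonneg (by omega)
    have hm0t : m0.toNat = PySem.Int.bitLength B - 1 := by omega
    rw [hm0t]
    calc ((2 : Int) ^ (PySem.Int.bitLength B - 1)) = ((2 ^ (PySem.Int.bitLength B - 1) : Nat) : Int) := by push_cast; ring
    _ ≤ (B.natAbs : Int) := by exact_mod_cast h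
    _ = B := hna
  -- isqrt facts
  have hr0 : 0 ≤ r := by simp [hrdef]
  obtain ⟨hr2', hrs'⟩ := pvIsqrt_spec s.toNat
  have hr2 : r * r ≤ s := by
    calc r * r = ((pvIsqrt s.toNat * pvIsqrt s.toNat : Nat) : Int) := by push_cast [hrdef]; ring
    _ ≤ (s.toNat : Int) := by exact_mod_cast hr2'
    _ = s := hstn
  have hrs : s < (r + 1) * (r + 1) := by
    calc s = (s.toNat : Int) := hstn.symm
    _ < (((pvIsqrt s.toNat + 1) * (pvIsqrt s.toNat + 1) : Nat) : Int) := by exact_mod_cast hrs'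
    _ = (r + 1) * (r + 1) := by push_cast [hrdef]; ring
  set c : Int := r - y with hcdef
  have hc0 : 0 ≤ c := by
    by_cases h : y ≤ 0
    · omega
    · -- y ≥ 1: r ≥ y since y² ≤ s
      by_contra hcon
      have hry : r + 1 ≤ y := by omega
      have hle : (r + 1) * (r + 1) ≤ y * y := mul_le_mul hry hry (by omega) (by omega)
      omega
  -- above c the cost exceeds B
  have hAbove : ∀ k : Int, c < k → pvCost y k > B := by
    intro k hk
    have hky : r + 1 ≤ k + y := by omega
    have hsq : (r + 1) * (r + 1) ≤ (k + y) * (k + y) := mul_le_mul hky hky (by omega) (by omega)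
    have hce := pvCost_eq y k
    have hexp : 2 * k * y + k ^ 2 = (k + y) * (k + y) - y * y := by ring
    rcases PySem.Int.mod_two_eq k with he | he <;> rw [he] at hce <;> norm_num at hce <;> linarith
  -- the target is affordable
  have hTgt : ¬ pvCost y (min m0 c) > B := by
    simp only [gt_iff_lt, not_lt]
    by_cases hcm : c ≤ m0
    · rw [min_eq_right hcm]
      have hce := pvCost_eq y c
      have heq : (c + y) * (c + y) = r * r := by rw [hcdef]; ring
      have hexp : 2 * c * y + c ^ 2 = (c + y) * (c + y) - y * y := by ring
      rcases PySem.Int.mod_two_eq c with he | he <;> rw [he] at hce <;> norm_num at hce <;> linarith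
    · rw [min_eq_left (by omega : m0 ≤ c)]
      have hce := pvCost_eq y m0
      have hexp : 2 * m0 * y + m0 ^ 2 = (m0 + y) * (m0 + y) - y * y := by ring
      by_cases hpos : 0 ≤ m0 + y
      · -- 0 ≤ m0 + y ≤ r - 1
        have h1 : m0 + y ≤ r - 1 := by omega
        have hr1 : 1 ≤ r := by omega
        have hsq : (m0 + y) * (m0 + y) ≤ (r - 1) * (r - 1) := mul_le_mul h1 h1 hpos (by omega)
        have hrr : (r - 1) * (r - 1) = r * r - 2 * r + 1 := by ring
        rcases PySem.Int.mod_two_eq m0 with he | he <;> rw [he] at hce <;> norm_num at hce <;> linarith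
      · -- m0 + y < 0 ⇒ y < 0; then 2·cost m0 ≤ m0² + 1 ≤ 2^(m0+1) ≤ 2B
        have hyneg : y ≤ -1 := by omega
        have h2my : m0 * y ≤ 0 := mul_nonpos_of_nonneg_of_nonpos hm0nn (by omega)
        have hsq1 : (m0.toNat : Int) = m0 := Int.toNat_of_nonneg hm0nn
        have hpow := pv_sq_add_one_le_two_pow m0.toNat
        have hpow' : (m0 : Int) ^ 2 + 1 ≤ 2 * 2 ^ m0.toNat := by
          calc (m0 : Int) ^ 2 + 1 = (((m0.toNat) ^ 2 + 1 : Nat) : Int) := by push_cast [hsq1]; ring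
          _ ≤ ((2 ^ (m0.toNat + 1) : Nat) : Int) := by exact_mod_cast hpow
          _ = 2 * 2 ^ m0.toNat := by push_cast [pow_succ]; ring
        rcases PySem.Int.mod_two_eq m0 with he | he <;> rw [he] at hce <;> norm_num at hce <;> linarith
  -- run the loop
  refine pvLoop_char B y (min m0 c) hTgt (m0.toNat + 1) m0 (min_le_left _ _) (by omega) ?_
  intro k hk1 hk2
  by_cases hcm2 : c ≤ m0
  · exact hAbove k (by rw [min_eq_right hcm2] at hk1; exact hk1)
  · exact absurd hk2 (by rw [min_eq_left (by omega : m0 ≤ c)] at hk1; omega)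

-- ===== VERDICT (by name: the statement is the Claim_ definition above) =====
theorem max_participants_spec : Claim_equal_max_participants := by
  intro t tc _ hpre
  unfold Spec_max_participants max_participants max_participants_alt
  apply PySem.List.foldl_congr_mem
  intro acc i hi
  obtain ⟨h0, hit⟩ := PySem.List.mem_pyRange_one.1 hi
  obtain ⟨hlen, hvals⟩ := hpre
  obtain ⟨n, rfl⟩ : ∃ n : Nat, i = (n : Int) := ⟨i.toNat, by omega⟩
  have hilen : n < tc.length := by omega
  have hmem : tc[n] ∈ tc.take t.toNat := by
    have hlt : n < (tc.take t.toNat).length := by simp [List.length_take]; omega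
    have he : (tc.take t.toNat)[n]'hlt = tc[n] := List.getElem_take
    exact he ▸ List.getElem_mem hlt
  obtain ⟨hB, hy⟩ := hvals _ hmem
  clear hy
  simp only [PySem.List.pyGet?_natCast, List.getElem?_eq_getElem hilen]
  rcases htc : tc[n] with ⟨B, y⟩
  rw [htc] at hB
  simp only [List.get_eq_getElem]
  rw [htc]
  simp only [pvKey B y hB]
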